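-- pv_equiv track=rewrite | github.com/SameetAsadullah/CSP-on-Exam-Scheduling-Using-Backtracking | src/main.py | backtrack
-- ===== SOURCE A (Python) =====
-- VARIABLES = ["A", "B", "C", "D", "E", "F", "G"]
--
-- DOMAIN = ["Monday", "Tuesday", "Wednesday"]
--
-- CONSTRAINTS = [
--     ("A", "B"),
--     ("A", "C"),
--     ("B", "C"),
--     ("B", "D"),
--     ("B", "E"),
--     ("C", "E"),
--     ("C", "F"),
--     ("D", "E"),
--     ("E", "F"),
--     ("E", "G"),
--     ("F", "G")
-- ]
--
-- def backtrack(assignment):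
--     """Runs backtracking search to find an assignment."""
--     # Check if assignment is complete
--     if len(assignment) == len(VARIABLES):
--         return assignment
--     var = select_unassigned_variable(assignment)
--     for value in DOMAIN:
--         if consistent(var, value, assignment):
--             assignment[var] = value
--             result = backtrack(assignment)
--             if result is not None:
--                 return result
--     return None
--
-- def select_unassigned_variable(assignment):
--     """Chooses a variable not yet assigned, in order."""
--     for var in VARIABLES:
--         if var not in assignment.keys():
--             return var
--
-- def consistent(var, value, assignment):
--     """Checks to see if an assignment is consistent."""
--     for var1, var2 in CONSTRAINTS:
--         if var1 == var or var2 == var: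
--             for var3, day in assignment.items():
--                 if (var3 == var2 or var3 == var1) and day == value:
--                     return False
--     return True
-- ===== SOURCE B (Python) =====
-- VARIABLES = ["A", "B", "C", "D", "E", "F", "G"]
--
-- DOMAIN = ["Monday", "Tuesday", "Wednesday"]
--
-- CONSTRAINTS = [
--     ("A", "B"),
--     ("A", "C"),
--     ("B", "C"),
--     ("B", "D"),
--     ("B", "E"),
--     ("C", "E"),
--     ("C", "F"),
--     ("D", "E"),
--     ("E", "F"),
--     ("E", "G"),
--     ("F", "G")
-- ]
--
-- # Adjacency index built once: maps each variable to the list of its neighbours.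
-- NEIGHBORS = {}
-- for _u, _v in CONSTRAINTS:
--     NEIGHBORS.setdefault(_u, []).append(_v)
--     NEIGHBORS.setdefault(_v, []).append(_u)
--
-- def backtrack(assignment):
--     """Runs backtracking search to find an assignment."""
--     if len(assignment) == len(VARIABLES):
--         return assignment
--     var = next(v for v in VARIABLES if v not in assignment)
--     for value in DOMAIN:
--         if all(assignment.get(n) != value for n in NEIGHBORS[var]):
--             assignment[var] = value
--             result = backtrack(assignment)
--             if result is not None:
--                 return result
--     return None
-- ===== Notes on version B (the rewrite author's own statement) =====
-- stated objective: simpler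
-- what changed: consistent()'s nested scan of all 11 CONSTRAINTS times the whole assignment is replaced by a single pass over a precomputed adjacency index (NEIGHBORS[var]), checking each neighbour's assigned day with one dict lookup; backtrack keeps its control flow and in-place mutation.
import Mathlib
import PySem

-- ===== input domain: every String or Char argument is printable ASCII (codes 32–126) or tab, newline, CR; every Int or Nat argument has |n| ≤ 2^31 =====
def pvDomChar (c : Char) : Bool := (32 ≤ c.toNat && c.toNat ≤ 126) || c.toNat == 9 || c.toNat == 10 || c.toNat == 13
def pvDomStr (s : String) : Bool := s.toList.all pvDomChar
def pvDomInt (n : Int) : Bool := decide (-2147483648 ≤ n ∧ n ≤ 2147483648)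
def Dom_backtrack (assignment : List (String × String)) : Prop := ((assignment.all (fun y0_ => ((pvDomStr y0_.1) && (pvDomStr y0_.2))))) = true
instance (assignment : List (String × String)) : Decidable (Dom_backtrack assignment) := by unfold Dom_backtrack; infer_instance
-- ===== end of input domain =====

-- B replaces A's nested scan of all CONSTRAINTS × the whole assignment in `consistent` by a single
-- pass over a precomputed adjacency index (simpler); both A and B mutate their dict argument in
-- place (assign, never delete) — the equivalence proved here is about the RETURN value only.

-- ===== PORT A =====
def pvVARIABLES : List String := ["A", "B", "C", "D", "E", "F", "G"]

def pvDOMAIN : List String := ["Monday", "Tuesday", "Wednesday"]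

def pvCONSTRAINTS : List (String × String) :=
  [("A","B"),("A","C"),("B","C"),("B","D"),("B","E"),("C","E"),
   ("C","F"),("D","E"),("E","F"),("E","G"),("F","G")]

-- select_unassigned_variable: first var of VARIABLES not among assignment.keys()
def selA : List String → PySem.Dict String String → Option String
  | [], _ => none
  | v :: vs, asg => if !((PySem.Dict.keys asg).contains v) then some v else selA vs asg

-- inner loop of consistent: 'for var3, day in assignment.items(): if (var3 == var2 or var3 == var1) and day == value: return False'
def innerA (v1 v2 value : String) : List (String × String) → Bool
  | [] => false
  | (v3, day) :: rest => if (v3 == v2 || v3 == v1) && day == value then true else innerA v1 v2 value rest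

-- outer loop of consistent over CONSTRAINTS
def outerA (var value : String) (asg : PySem.Dict String String) : List (String × String) → Bool
  | [] => true
  | (v1, v2) :: cs =>
    if v1 == var || v2 == var then
      if innerA v1 v2 value (PySem.Dict.items asg) then false else outerA var value asg cs
    else outerA var value asg cs

def consistentA (var value : String) (asg : PySem.Dict String String) : Bool :=
  outerA var value asg pvCONSTRAINTS

-- backtrack: fuel only makes the recursion total (8 never runs out when the dict's keys are
-- distinct variables, the precondition); the state component threads Python's in-place mutation.
mutual
def goA : Nat → PySem.Dict String String →
    Option (PySem.Dict String String) × PySem.Dict String String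
  | 0, asg => (none, asg)
  | Nat.succ f, asg =>
    if (PySem.Dict.items asg).length == pvVARIABLES.length then (some asg, asg)
    else
      match selA pvVARIABLES asg with
      | none => (none, asg)   -- Python recurses forever here (var = None); unreachable under Pre_
      | some var => loopA f var asg pvDOMAIN

def loopA : Nat → String → PySem.Dict String String → List String →
    Option (PySem.Dict String String) × PySem.Dict String String
  | _, _, asg, [] => (none, asg)
  | f, var, asg, value :: rest =>
    if consistentA var value asg then
      match goA f (PySem.Dict.insert asg var value) with
      | (some r, asg') => (some r, asg')
      | (none, asg') => loopA f var asg' rest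
    else loopA f var asg rest
end

def backtrack (assignment : List (String × String)) : Option (List (String × String)) :=
  ((goA 8 (PySem.Dict.mk assignment)).1).map PySem.Dict.items

-- ===== PORT B =====
-- adjacency index, built once from CONSTRAINTS
def pvNEIGHBORS : PySem.Dict String (List String) :=
  pvCONSTRAINTS.foldl (fun d p =>
    let d1 := PySem.Dict.insert d p.1 (PySem.Dict.getD d p.1 [] ++ [p.2])
    PySem.Dict.insert d1 p.2 (PySem.Dict.getD d1 p.2 [] ++ [p.1])) PySem.Dict.empty

-- consistent: one pass over the precomputed neighbours only
def consistentB (var value : String) (asg : PySem.Dict String String) : Bool :=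
  (PySem.Dict.getD pvNEIGHBORS var []).all (fun n => PySem.Dict.get? asg n != some value)

-- next(v for v in VARIABLES if v not in assignment)
def selB (asg : PySem.Dict String String) : Option String :=
  pvVARIABLES.find? (fun v => !(PySem.Dict.contains asg v))

mutual
def goB : Nat → PySem.Dict String String →
    Option (PySem.Dict String String) × PySem.Dict String String
  | 0, asg => (none, asg)
  | Nat.succ f, asg =>
    if (PySem.Dict.items asg).length == pvVARIABLES.length then (some asg, asg)
    else
      match selB asg with
      | none => (none, asg)   -- next(...) raises StopIteration; unreachable under Pre_
      | some var => loopB f var asg pvDOMAIN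

def loopB : Nat → String → PySem.Dict String String → List String →
    Option (PySem.Dict String String) × PySem.Dict String String
  | _, _, asg, [] => (none, asg)
  | f, var, asg, value :: rest =>
    if consistentB var value asg then
      match goB f (PySem.Dict.insert asg var value) with
      | (some r, asg') => (some r, asg')
      | (none, asg') => loopB f var asg' rest
    else loopB f var asg rest
end

def backtrack_alt (assignment : List (String × String)) : Option (List (String × String)) :=
  ((goB 8 (PySem.Dict.mk assignment)).1).map PySem.Dict.items

-- ===== PRECONDITION & SPEC =====
-- Pre_ excludes duplicate keys (impossible for a Python dict) and dicts with more than 7 entries: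
-- on those the completion test 'len(assignment) == len(VARIABLES)' can never fire, so A recurses
-- without bound (RecursionError) except in the rare case that the preassigned days already make
-- the whole search fail.
def Pre_backtrack (assignment : List (String × String)) : Prop :=
  (assignment.map Prod.fst).Nodup ∧ assignment.length ≤ 7
instance (assignment : List (String × String)) : Decidable (Pre_backtrack assignment) := by
  unfold Pre_backtrack; infer_instance

def pvWitness_backtrack : (List (String × String)) := [("A", "Monday")]

def Spec_backtrack (assignment : List (String × String)) (out : Option (List (String × String))) : Prop := out = backtrack_alt assignment
instance (assignment : List (String × String)) (out : Option (List (String × String))) : Decidable (Spec_backtrack assignment out) := by unfold Spec_backtrack; infer_instance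

-- ===== CLAIM (what is proved, stated in full; the proofs are below) =====
def Claim_equal_backtrack : Prop := ∀ (assignment : List (String × String)), Dom_backtrack assignment → Pre_backtrack assignment → Spec_backtrack assignment (backtrack assignment)

-- ===== LEMMAS AND PROOFS =====

-- dict-state invariant maintained through the search
abbrev DInv (d : PySem.Dict String String) : Prop :=
  (PySem.Dict.keys d).Nodup

theorem selA_find (asg : PySem.Dict String String) (l : List String) :
    selA l asg = l.find? (fun v => !(PySem.Dict.contains asg v)) := by
  induction l with
  | nil => rfl
  | cons v vs ih =>
    have hc : (PySem.Dict.keys asg).contains v = PySem.Dict.contains asg v := by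
      rw [PySem.Dict.contains_eq_decide_mem_keys]
      simp
    rw [selA, hc, List.find?]
    cases h : PySem.Dict.contains asg v <;> simp [ih]

theorem selA_eq_selB (asg : PySem.Dict String String) : selA pvVARIABLES asg = selB asg :=
  selA_find asg pvVARIABLES

theorem innerA_eq_any (v1 v2 value : String) (l : List (String × String)) :
    innerA v1 v2 value l = l.any (fun p => (p.1 == v2 || p.1 == v1) && p.2 == value) := by
  induction l with
  | nil => rfl
  | cons p rest ih =>
    obtain ⟨v3, day⟩ := p
    rw [innerA, List.any_cons, ih]
    by_cases h : ((v3 == v2 || v3 == v1) && day == value) = true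
    · simp [h]
    · simp only [if_neg h]
      simp only [Bool.not_eq_true] at h
      rw [h, Bool.false_or]

theorem outerA_eq (var value : String) (asg : PySem.Dict String String)
    (cs : List (String × String)) :
    outerA var value asg cs =
      !(cs.any (fun c => (c.1 == var || c.2 == var) && innerA c.1 c.2 value (PySem.Dict.items asg))) := by
  induction cs with
  | nil => rfl
  | cons c rest ih =>
    obtain ⟨v1, v2⟩ := c
    rw [outerA, List.any_cons]
    cases h1 : (v1 == var || v2 == var) <;>
      cases h2 : innerA v1 v2 value (PySem.Dict.items asg) <;>
        simp [ih]

theorem any_nbr (k var value : String) (asg : PySem.Dict String String)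
    (hnd : (PySem.Dict.keys asg).Nodup)
    (hv : ∀ day, PySem.Dict.get? asg var = some day → day ≠ value)
    (_hne : k ≠ var) :
    ((PySem.Dict.items asg).any (fun p => (p.1 == k || p.1 == var) && p.2 == value)) =
      (PySem.Dict.get? asg k == some value) := by
  rw [Bool.eq_iff_iff]
  simp only [List.any_eq_true, Bool.and_eq_true, Bool.or_eq_true, beq_iff_eq]
  constructor
  · rintro ⟨⟨a, b⟩, hp, hab, hval⟩
    simp only at hab hval
    subst hval
    rcases hab with rfl | rfl
    · exact PySem.Dict.get?_of_mem_items asg hp hnd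
    · exact absurd rfl (hv b (PySem.Dict.get?_of_mem_items asg hp hnd))
  · intro h
    exact ⟨(k, value), PySem.Dict.mem_items_of_get?_eq_some asg h, Or.inl rfl, rfl⟩

theorem any_nbr' (k var value : String) (asg : PySem.Dict String String)
    (hnd : (PySem.Dict.keys asg).Nodup)
    (hv : ∀ day, PySem.Dict.get? asg var = some day → day ≠ value)
    (_hne : k ≠ var) :
    ((PySem.Dict.items asg).any (fun p => (p.1 == var || p.1 == k) && p.2 == value)) =
      (PySem.Dict.get? asg k == some value) := by
  rw [Bool.eq_iff_iff]
  simp only [List.any_eq_true, Bool.and_eq_true, Bool.or_eq_true, beq_iff_eq]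
  constructor
  · rintro ⟨⟨a, b⟩, hp, hab, hval⟩
    simp only at hab hval
    subst hval
    rcases hab with rfl | rfl
    · exact absurd rfl (hv b (PySem.Dict.get?_of_mem_items asg hp hnd))
    · exact PySem.Dict.get?_of_mem_items asg hp hnd
  · intro h
    exact ⟨(k, value), PySem.Dict.mem_items_of_get?_eq_some asg h, Or.inr rfl, rfl⟩

theorem consistent_eq (var value : String) (asg : PySem.Dict String String)
    (hvar : var ∈ pvVARIABLES)
    (hnd : (PySem.Dict.keys asg).Nodup)
    (hv : ∀ day, PySem.Dict.get? asg var = some day → day ≠ value) :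
    consistentA var value asg = consistentB var value asg := by
  have hB : PySem.Dict.getD pvNEIGHBORS "A" [] = ["B", "C"] := by rfl
  have hB2 : PySem.Dict.getD pvNEIGHBORS "B" [] = ["A", "C", "D", "E"] := by rfl
  have hB3 : PySem.Dict.getD pvNEIGHBORS "C" [] = ["A", "B", "E", "F"] := by rfl
  have hB4 : PySem.Dict.getD pvNEIGHBORS "D" [] = ["B", "E"] := by rfl
  have hB5 : PySem.Dict.getD pvNEIGHBORS "E" [] = ["B", "C", "D", "F", "G"] := by rfl
  have hB6 : PySem.Dict.getD pvNEIGHBORS "F" [] = ["C", "E", "G"] := by rfl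
  have hB7 : PySem.Dict.getD pvNEIGHBORS "G" [] = ["E", "F"] := by rfl
  rw [consistentA, outerA_eq]
  simp only [pvVARIABLES, List.mem_cons, List.not_mem_nil, or_false] at hvar
  rcases hvar with rfl | rfl | rfl | rfl | rfl | rfl | rfl <;>
    simp only [pvCONSTRAINTS, List.any_cons, List.any_nil, innerA_eq_any] <;>
    [rw [consistentB, hB]; rw [consistentB, hB2]; rw [consistentB, hB3];
     rw [consistentB, hB4]; rw [consistentB, hB5]; rw [consistentB, hB6];
     rw [consistentB, hB7]] <;>
    simp only [List.all_cons, List.all_nil, bne] <;>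
    first
    | (rw [any_nbr "B" "A" value asg hnd hv (by decide), any_nbr "C" "A" value asg hnd hv (by decide)]
       simp [Bool.not_or])
    | (rw [any_nbr' "A" "B" value asg hnd hv (by decide), any_nbr "C" "B" value asg hnd hv (by decide),
         any_nbr "D" "B" value asg hnd hv (by decide), any_nbr "E" "B" value asg hnd hv (by decide)]
       simp [Bool.not_or])
    | (rw [any_nbr' "A" "C" value asg hnd hv (by decide), any_nbr' "B" "C" value asg hnd hv (by decide),
         any_nbr "E" "C" value asg hnd hv (by decide), any_nbr "F" "C" value asg hnd hv (by decide)]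
       simp [Bool.not_or])
    | (rw [any_nbr' "B" "D" value asg hnd hv (by decide), any_nbr "E" "D" value asg hnd hv (by decide)]
       simp [Bool.not_or])
    | (rw [any_nbr' "B" "E" value asg hnd hv (by decide), any_nbr' "C" "E" value asg hnd hv (by decide),
         any_nbr' "D" "E" value asg hnd hv (by decide), any_nbr "F" "E" value asg hnd hv (by decide),
         any_nbr "G" "E" value asg hnd hv (by decide)]
       simp [Bool.not_or])
    | (rw [any_nbr' "C" "F" value asg hnd hv (by decide), any_nbr' "E" "F" value asg hnd hv (by decide),
         any_nbr "G" "F" value asg hnd hv (by decide)]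
       simp [Bool.not_or])
    | (rw [any_nbr' "E" "G" value asg hnd hv (by decide), any_nbr' "F" "G" value asg hnd hv (by decide)]
       simp [Bool.not_or])

theorem sel_some (asg : PySem.Dict String String) (var : String)
    (h : selB asg = some var) :
    var ∈ pvVARIABLES ∧ PySem.Dict.get? asg var = none := by
  have h1 := List.mem_of_find?_eq_some h
  have h2 := List.find?_some h
  refine ⟨h1, ?_⟩
  simp only [Bool.not_eq_true'] at h2
  rw [PySem.Dict.get?_eq_none_iff_contains]
  exact h2

theorem main_go (f : Nat) :
    (∀ asg, DInv asg →
      goA f asg = goB f asg ∧ DInv (goA f asg).2 ∧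
      (∀ k v, PySem.Dict.get? asg k = some v → PySem.Dict.get? (goA f asg).2 k = some v)) := by
  induction f with
  | zero =>
    intro asg h
    simp only [goA, goB]
    exact ⟨trivial, h, fun k v hk => hk⟩
  | succ f ih =>
    have loop : ∀ (vs : List String) (var : String) (asg : PySem.Dict String String),
        DInv asg → var ∈ pvVARIABLES → vs.Nodup →
        (∀ day, PySem.Dict.get? asg var = some day → day ∉ vs) →
        loopA f var asg vs = loopB f var asg vs ∧ DInv (loopA f var asg vs).2 ∧
        (∀ k v, k ≠ var → PySem.Dict.get? asg k = some v →
          PySem.Dict.get? (loopA f var asg vs).2 k = some v) := by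
      intro vs
      induction vs with
      | nil =>
        intro var asg hinv _ _ _
        simp only [loopA, loopB]
        exact ⟨trivial, hinv, fun k v _ hk => hk⟩
      | cons value rest ihv =>
        intro var asg hinv hvmem hnd hv
        have hcons : consistentA var value asg = consistentB var value asg :=
          consistent_eq var value asg hvmem (show (PySem.Dict.keys asg).Nodup from hinv)
            (fun day hday => fun heq => (hv day hday) (heq ▸ List.mem_cons_self))
        rw [loopA, loopB, hcons]
        cases hc : consistentB var value asg
        · simp only [Bool.false_eq_true, if_false]
          exact ihv var asg hinv hvmem (List.Nodup.of_cons hnd)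
            (fun day hday => fun hmem => (hv day hday) (List.mem_cons_of_mem value hmem))
        · simp only [if_true]
          set asg1 := PySem.Dict.insert asg var value with hasg1
          have hinv1 : DInv asg1 :=
            PySem.Dict.nodup_keys_insert asg var value (show (PySem.Dict.keys asg).Nodup from hinv)
          obtain ⟨hAB, hinv', hpres⟩ := ih asg1 hinv1
          rw [hAB]
          rcases hgo : goB f asg1 with ⟨opt, asg'⟩
          have hinv'' : DInv asg' := by rw [hAB, hgo] at hinv'; exact hinv'
          have hpres' : ∀ k v, PySem.Dict.get? asg1 k = some v →
              PySem.Dict.get? asg' k = some v := by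
            intro k v hk
            have := hpres k v hk
            rw [hAB, hgo] at this
            exact this
          cases opt with
          | some r =>
            refine ⟨rfl, hinv'', ?_⟩
            intro k v hk hkv
            exact hpres' k v (by
              rw [hasg1, PySem.Dict.get?_insert_of_ne asg value hk]; exact hkv)
          | none =>
            have hvar' : PySem.Dict.get? asg' var = some value :=
              hpres' var value (PySem.Dict.get?_insert_self asg var value)
            have hrest := ihv var asg' hinv'' hvmem (List.Nodup.of_cons hnd)
              (fun day hday => by
                rw [hvar'] at hday
                cases hday
                exact (List.nodup_cons.1 hnd).1)
            refine ⟨hrest.1, hrest.2.1, ?_⟩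
            intro k v hk hkv
            exact hrest.2.2 k v hk
              (hpres' k v (by
                rw [hasg1, PySem.Dict.get?_insert_of_ne asg value hk]; exact hkv))
    intro asg hinv
    rw [goA, goB]
    cases hlen : ((PySem.Dict.items asg).length == pvVARIABLES.length)
    · simp only [Bool.false_eq_true, if_false]
      rw [selA_eq_selB]
      cases hsel : selB asg with
      | none => exact ⟨rfl, hinv, fun k v hk => hk⟩
      | some var =>
        obtain ⟨hvmem, hnone⟩ := sel_some asg var hsel
        have h := loop pvDOMAIN var asg hinv hvmem (by decide)
          (fun day hday => by rw [hnone] at hday; cases hday)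
        refine ⟨h.1, h.2.1, ?_⟩
        intro k v hk
        have hkv : k ≠ var := fun he => by rw [he, hnone] at hk; cases hk
        exact h.2.2 k v hkv hk
    · simp only [if_true]
      exact ⟨trivial, hinv, fun k v hk => hk⟩
-- ===== VERDICT (by name: the statement is the Claim_ definition above) =====
theorem backtrack_spec : Claim_equal_backtrack := by
  intro assignment _ hpre
  unfold Spec_backtrack backtrack backtrack_alt
  have h := (main_go 8 (PySem.Dict.mk assignment)
    (by simpa [DInv, PySem.Dict.keys_mk] using hpre.1)).1
  rw [h]
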